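-- pv_equiv track=rewrite | github.com/perchonock/stepic | Algorithms/Greedy algorithms.py | dif_numbers
-- ===== SOURCE A (Python) =====
-- def dif_numbers(n_string):
--     n = int(n_string)
--     n2 = int(n)
--     numbers = []
--     i = 1
--     while n2 > 0:
--         if n2-i <= i:
--             numbers.append(n2)
--             break
--         else:
--             numbers.append(i)
--             n2 -= i
--         i +=1
--     return len(numbers), numbers
-- ===== SOURCE B (Python) =====
-- def dif_numbers(n_string):
--     n = int(n_string)
--     if n <= 0:
--         return 0, []
--     k = 1
--     while k * (k + 3) < 2 * n:
--         k += 1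
--     return k, list(range(1, k)) + [n - k * (k - 1) // 2]
-- ===== Notes on version B (the rewrite author's own statement) =====
-- stated objective: simpler
-- what changed: A's loop mutates a remainder and appends each summand; B only steps a counter k to the first k with k*(k+3) >= 2n (the closed-form greedy stopping point) and then emits the whole answer at once as list(range(1,k)) + [n - k*(k-1)//2].
import Mathlib
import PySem

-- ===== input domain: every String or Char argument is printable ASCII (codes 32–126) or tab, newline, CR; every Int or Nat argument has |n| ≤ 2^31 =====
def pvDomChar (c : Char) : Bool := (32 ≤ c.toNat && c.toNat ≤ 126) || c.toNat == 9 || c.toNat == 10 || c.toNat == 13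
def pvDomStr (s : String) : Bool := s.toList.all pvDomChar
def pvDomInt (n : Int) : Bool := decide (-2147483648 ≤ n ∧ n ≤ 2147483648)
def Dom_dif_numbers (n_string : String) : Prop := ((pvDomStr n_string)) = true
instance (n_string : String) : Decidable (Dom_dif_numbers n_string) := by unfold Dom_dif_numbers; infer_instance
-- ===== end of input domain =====

-- B replaces A's remainder-mutating append loop by a pure counter scan for the greedy
-- stopping index k plus a closed-form result list; objective: simpler (same cost).

-- ===== PORT A =====
-- A's while loop, step for step; 'fuel' only makes the recursion total (n.toNat steps
-- always suffice, since n2 shrinks by i ≥ 1 each iteration) and is not part of A's logic.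
def difLoopA (fuel : Nat) (n2 : Int) (i : Int) (numbers : List Int) : List Int :=
  match fuel with
  | 0 => numbers
  | fuel + 1 =>
    if 0 < n2 then
      if n2 - i ≤ i then
        numbers ++ [n2]
      else
        difLoopA fuel (n2 - i) (i + 1) (numbers ++ [i])
    else
      numbers

def dif_numbers (n_string : String) : Int × List Int :=
  match PySem.Int.ofStr? n_string with
  | none => (0, [])   -- int(n_string) raises ValueError: excluded by Pre_
  | some n =>
    let numbers := difLoopA n.toNat n 1 []
    ((numbers.length : Int), numbers)

-- ===== PORT B =====
-- B's counter loop; again 'fuel' (n.toNat steps suffice) only makes it total.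
def difLoopB (fuel : Nat) (n : Int) (k : Int) : Int :=
  match fuel with
  | 0 => k
  | fuel + 1 =>
    if k * (k + 3) < 2 * n then
      difLoopB fuel n (k + 1)
    else
      k

def dif_numbers_alt (n_string : String) : Int × List Int :=
  match PySem.Int.ofStr? n_string with
  | none => (0, [])   -- int(n_string) raises ValueError: excluded by Pre_
  | some n =>
    if n ≤ 0 then (0, [])
    else
      let k := difLoopB n.toNat n 1
      (k, PySem.List.pyRange 1 k 1 ++ [n - PySem.Int.floordiv (k * (k - 1)) 2])

-- ===== PRECONDITION & SPEC =====
-- Pre_ excludes exactly the strings on which int(n_string) raises ValueError (both A and B raise there).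
def Pre_dif_numbers (n_string : String) : Prop := (PySem.Int.ofStr? n_string).isSome = true
instance (n_string : String) : Decidable (Pre_dif_numbers n_string) := by unfold Pre_dif_numbers; infer_instance
def pvWitness_dif_numbers : String := "10"

def Spec_dif_numbers (n_string : String) (out : Int × List Int) : Prop := out = dif_numbers_alt n_string
instance (n_string : String) (out : Int × List Int) : Decidable (Spec_dif_numbers n_string out) := by unfold Spec_dif_numbers; infer_instance

-- ===== CLAIM (what is proved, stated in full; the proofs are below) =====
def Claim_equal_dif_numbers : Prop := ∀ (n_string : String), Dom_dif_numbers n_string → Pre_dif_numbers n_string → Spec_dif_numbers n_string (dif_numbers n_string)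

-- ===== LEMMAS AND PROOFS =====

-- B's loop never returns less than its starting counter.
theorem difLoopB_ge (fuel : Nat) (n : Int) : ∀ k : Int, k ≤ difLoopB fuel n k := by
  induction fuel with
  | zero => intro k; simp [difLoopB]
  | succ fuel ih =>
    intro k
    rw [difLoopB]
    split
    · have := ih (k + 1); omega
    · omega

-- Main invariant: while A's loop is still running at summand i with remainder n2
-- (so 2*n2 = 2*n - (i-1)*i), it produces exactly B's closed-form tail, and the two
-- loops consume their (sufficient) fuel in lockstep.
theorem difLoop_eq (n : Int) : ∀ (fuel : Nat) (i n2 : Int) (acc : List Int),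
    1 ≤ i → 0 < n2 → 2 * n2 = 2 * n - (i - 1) * i → n2.toNat ≤ fuel →
    difLoopA fuel n2 i acc =
      acc ++ PySem.List.pyRange i (difLoopB fuel n i) 1
          ++ [n - difLoopB fuel n i * (difLoopB fuel n i - 1) / 2] := by
  intro fuel
  induction fuel with
  | zero => intro i n2 acc h0 h1 h2 hf; omega
  | succ fuel ih =>
    intro i n2 acc h0 h1 h2 hf
    have e1 : i * (i + 3) = i * i + 3 * i := by ring
    have e2 : (i - 1) * i = i * i - i := by ring
    rw [difLoopA, difLoopB]
    by_cases hc : i * (i + 3) < 2 * n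
    · -- continue: A's inner test is false, both loops recurse
      have hstop : ¬ (n2 - i ≤ i) := by
        rw [e1] at hc; rw [e2] at h2
        generalize i * i = m at hc h2; omega
      have h1' : 0 < n2 - i := by
        rw [e1] at hc; rw [e2] at h2
        generalize i * i = m at hc h2; omega
      have h2' : 2 * (n2 - i) = 2 * n - (i + 1 - 1) * (i + 1) := by
        have e3 : (i + 1 - 1) * (i + 1) = (i - 1) * i + 2 * i := by ring
        rw [e3]; omega
      have hrec := ih (i + 1) (n2 - i) (acc ++ [i]) (by omega) h1' h2' (by omega)
      simp only [if_pos h1, if_neg hstop, if_pos hc, hrec]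
      have hk : i + 1 ≤ difLoopB fuel n (i + 1) := difLoopB_ge fuel n (i + 1)
      have hr : PySem.List.pyRange i (difLoopB fuel n (i + 1)) 1
          = i :: PySem.List.pyRange (i + 1) (difLoopB fuel n (i + 1)) 1 :=
        PySem.List.pyRange_one_cons (by omega)
      rw [hr]
      simp
    · -- stop: A appends the remainder n2, B returns the current counter i
      have hstop : n2 - i ≤ i := by
        rw [e1] at hc; rw [e2] at h2
        generalize i * i = m at hc h2; omega
      have hlast : n2 = n - i * (i - 1) / 2 := by
        have e3 : i * (i - 1) = i * i - i := by ring
        rw [e3]; rw [e2] at h2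
        generalize i * i = m at h2 ⊢; omega
      simp only [if_pos h1, if_pos hstop, if_neg hc]
      rw [PySem.List.pyRange_one_eq_nil (le_refl _), hlast]
      simp

-- ===== VERDICT (by name: the statement is the Claim_ definition above) =====
theorem dif_numbers_spec : Claim_equal_dif_numbers := by
  intro s _ hpre
  unfold Spec_dif_numbers dif_numbers dif_numbers_alt
  cases h : PySem.Int.ofStr? s with
  | none => simp [Pre_dif_numbers, h] at hpre
  | some n =>
    by_cases hn : n ≤ 0
    · have hA : difLoopA n.toNat n 1 [] = [] := by
        have : n.toNat = 0 := by omega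
        rw [this, difLoopA]
      dsimp only
      simp [hA, hn]
    · have hmain := difLoop_eq n n.toNat 1 n [] (by omega) (by omega) (by ring) (le_refl _)
      have hk1 : (1 : Int) ≤ difLoopB n.toNat n 1 := difLoopB_ge n.toNat n 1
      have hfd : PySem.Int.floordiv (difLoopB n.toNat n 1 * (difLoopB n.toNat n 1 - 1)) 2
          = difLoopB n.toNat n 1 * (difLoopB n.toNat n 1 - 1) / 2 :=
        PySem.Int.floordiv_eq_ediv_of_pos (by omega)
      dsimp only
      rw [if_neg hn]
      simp only [hmain, hfd, List.nil_append, Prod.mk.injEq]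
      refine ⟨?_, by simp⟩
      simp [PySem.List.length_pyRange_one]
      omega
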